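-- pv_equiv track=rewrite | github.com/travenos/genetics | with_plots/task1.py | gray2bin
-- ===== SOURCE A (Python) =====
-- def gray2bin(gray_code):
--     """Перевести массив с кодом Грея в массив с двоичной СИ"""
--     gray_code = list(map(bool, gray_code))
--     binary = gray_code.copy()
--     shifted = gray_code
--     for _ in range(len(gray_code) - 1):
--         shifted = [False] + shifted[:-1]
--         binary = [b != bs for b, bs in zip(binary, shifted)]
--     binary = list(map(int, binary))
--     return binary
-- ===== SOURCE B (Python) =====
-- def gray2bin(gray_code):
--     """Перевести массив с кодом Грея в массив с двоичной СИ"""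
--     binary = []
--     acc = False
--     for g in gray_code:
--         acc ^= (g != 0)
--         binary.append(int(acc))
--     return binary
-- ===== Notes on version B (the rewrite author's own statement) =====
-- stated objective: faster
-- what changed: Replaced the O(n^2) repeated shift-and-XOR of whole lists with a single pass keeping a running prefix-XOR accumulator.
import Mathlib
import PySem

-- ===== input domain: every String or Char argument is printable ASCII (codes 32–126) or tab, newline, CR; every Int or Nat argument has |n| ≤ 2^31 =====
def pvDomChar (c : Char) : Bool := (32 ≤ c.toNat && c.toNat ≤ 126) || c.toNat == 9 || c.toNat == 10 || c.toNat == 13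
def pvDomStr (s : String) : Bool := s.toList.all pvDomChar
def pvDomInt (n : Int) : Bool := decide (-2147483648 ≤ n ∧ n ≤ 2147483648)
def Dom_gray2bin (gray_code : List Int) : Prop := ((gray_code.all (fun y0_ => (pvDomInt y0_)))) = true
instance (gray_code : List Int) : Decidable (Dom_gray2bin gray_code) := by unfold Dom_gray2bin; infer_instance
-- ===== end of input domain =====

-- B replaces A's O(n^2) repeated whole-list shift-and-XOR by one pass with a running prefix-XOR accumulator (O(n)).

-- ===== PORT A =====
-- one iteration of A's loop body: shifted = [False] + shifted[:-1]; binary = [b != bs for b, bs in zip(binary, shifted)]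
def grayStepA (p : List Bool × List Bool) : List Bool × List Bool :=
  let shifted := false :: p.2.dropLast
  (List.zipWith (fun b bs => b != bs) p.1 shifted, shifted)

def gray2bin (gray_code : List Int) : List Int :=
  let g : List Bool := gray_code.map (fun x => decide (x ≠ 0))   -- list(map(bool, gray_code))
  let s := (List.range (g.length - 1)).foldl (fun p _ => grayStepA p) (g, g)
  s.1.map (fun b => if b then (1 : Int) else 0)                  -- list(map(int, binary))

-- ===== PORT B =====
def gray2bin_alt (gray_code : List Int) : List Int :=
  (gray_code.foldl
    (fun (p : List Int × Bool) g =>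
      let acc := xor p.2 (decide (g ≠ 0))
      (p.1 ++ [if acc then (1 : Int) else 0], acc))
    ([], false)).1

-- ===== PRECONDITION & SPEC =====
def Spec_gray2bin (gray_code : List Int) (out : List Int) : Prop := out = gray2bin_alt gray_code
instance (gray_code : List Int) (out : List Int) : Decidable (Spec_gray2bin gray_code out) := by unfold Spec_gray2bin; infer_instance

-- ===== CLAIM (what is proved, stated in full; the proofs are below) =====
def Claim_equal_gray2bin : Prop := ∀ (gray_code : List Int), Dom_gray2bin gray_code → Spec_gray2bin gray_code (gray2bin gray_code)

-- ===== LEMMAS AND PROOFS =====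

-- prefix-xor scan of a Bool list starting from accumulator a
def pxor (a : Bool) : List Bool → List Bool
  | [] => []
  | x :: xs => (xor a x) :: pxor (xor a x) xs

theorem pxor_length (a : Bool) (g : List Bool) : (pxor a g).length = g.length := by
  induction g generalizing a with
  | nil => rfl
  | cons x xs ih => simp [pxor, ih]

theorem pxor_getD (g : List Bool) (a : Bool) (i : Nat) (h : i < g.length) :
    (pxor a g).getD i false = List.foldl xor a (g.take (i + 1)) := by
  induction g generalizing a i with
  | nil => simp at h
  | cons x xs ih =>
    cases i with
    | zero => simp [pxor, List.foldl]
    | succ j =>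
      simp only [pxor, List.getD_cons_succ, List.take_succ_cons, List.foldl_cons]
      exact ih (xor a x) j (by simpa using h)

theorem alt_foldl (xs : List Int) : ∀ (acc : Bool) (done : List Int),
    (xs.foldl
      (fun (p : List Int × Bool) g =>
        let acc := xor p.2 (decide (g ≠ 0))
        (p.1 ++ [if acc then (1 : Int) else 0], acc))
      (done, acc)).1
    = done ++ (pxor acc (xs.map (fun x => decide (x ≠ 0)))).map (fun b => if b then (1 : Int) else 0) := by
  induction xs with
  | nil => intro acc done; simp [pxor]
  | cons x xs ih =>
    intro acc done
    simp only [List.foldl_cons, List.map_cons, pxor, List.map_cons]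
    rw [ih]
    simp

theorem foldl_range_const {α : Type} (f : α → α) : ∀ (n : Nat) (init : α),
    List.foldl (fun p _ => f p) init (List.range n) = f^[n] init := by
  intro n
  induction n with
  | zero => intro init; rfl
  | succ m ih =>
    intro init
    rw [List.range_succ, List.foldl_append, ih, Function.iterate_succ_apply']
    rfl

theorem bne_eq_xor (a b : Bool) : (a != b) = xor a b := by cases a <;> cases b <;> rfl

theorem foldl_xor_shift (l : List Bool) : ∀ (a : Bool), List.foldl xor a l = xor a (List.foldl xor false l) := by
  induction l with
  | nil => intro a; simp
  | cons x xs ih =>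
    intro a
    simp only [List.foldl_cons]
    rw [ih (xor a x), ih (xor false x)]
    cases a <;> cases x <;> simp

-- loop invariant for A's iteration
theorem stepA_iter (g : List Bool) (hg : g ≠ []) : ∀ (k : Nat),
    (grayStepA^[k] (g, g)).2.length = g.length ∧
    (grayStepA^[k] (g, g)).1.length = g.length ∧
    (∀ i, i < g.length →
      (grayStepA^[k] (g, g)).2.getD i false = if i < k then false else g.getD (i - k) false) ∧
    (∀ i, i < g.length →
      (grayStepA^[k] (g, g)).1.getD i false = List.foldl xor false ((g.take (i + 1)).drop (i - k))) := by
  intro k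
  induction k with
  | zero =>
    refine ⟨rfl, rfl, ?_, ?_⟩
    · intro i hi; simp
    · intro i hi
      simp only [Function.iterate_zero, id_eq, Nat.sub_zero]
      have h1 : i < (List.take (i+1) g).length := by simp [List.length_take]; omega
      rw [List.drop_eq_getElem_cons h1]
      have ht : List.drop (i+1) (List.take (i+1) g) = [] := by
        apply List.drop_eq_nil_of_le; simp [List.length_take]
      rw [ht, List.getD_eq_getElem _ _ hi]
      simp [List.foldl, List.getElem_take]
  | succ k ih =>
    obtain ⟨h2len, h1len, h2, h1⟩ := ih
    have hn : 0 < g.length := List.length_pos_iff.mpr hg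
    rw [Function.iterate_succ_apply']
    set st := grayStepA^[k] (g, g) with hst
    have s2ne : st.2 ≠ [] := by
      intro h; rw [h] at h2len; simp at h2len; omega
    have hlen2' : (false :: st.2.dropLast).length = g.length := by
      simp [List.length_dropLast, h2len]
      omega
    have hget2' : ∀ i, i < g.length →
        (false :: st.2.dropLast).getD i false = if i < k + 1 then false else g.getD (i - (k+1)) false := by
      intro i hi
      cases i with
      | zero => simp
      | succ j =>
        have hj : j < g.length - 1 := by omega
        have hjlt : j < st.2.dropLast.length := by simp [List.length_dropLast, h2len]; omega
        have hjg : j < g.length := by omega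
        rw [List.getD_cons_succ, List.getD_eq_getElem _ _ hjlt, List.getElem_dropLast,
            ← List.getD_eq_getElem _ false]
        rw [h2 j hjg]
        have : (j < k) = (j + 1 < k + 1) := by simp
        simp only [Nat.succ_sub_succ]
        split_ifs with h1' h2' h3' <;> first | rfl | omega
    refine ⟨?_, ?_, hget2', ?_⟩
    · simpa [grayStepA] using hlen2'
    · simp only [grayStepA, List.length_zipWith, h1len, hlen2']
      omega
    · intro i hi
      have hiz : i < (List.zipWith (fun b bs => b != bs) st.1 (false :: st.2.dropLast)).length := by
        simp [List.length_zipWith, h1len, hlen2', hi]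
      simp only [grayStepA]
      rw [List.getD_eq_getElem _ _ hiz, List.getElem_zipWith, bne_eq_xor,
          ← List.getD_eq_getElem st.1 false, ← List.getD_eq_getElem (false :: st.2.dropLast) false,
          h1 i hi, hget2' i hi]
      by_cases hik : i < k + 1
      · have e1 : i - k = 0 := by omega
        have e2 : i - (k + 1) = 0 := by omega
        rw [if_pos hik, e1, e2, Bool.xor_false]
      · have hlt : i - (k+1) < (List.take (i+1) g).length := by
          simp [List.length_take]; omega
        have hgi : i - (k+1) < g.length := by omega
        have hstep : i - (k+1) + 1 = i - k := by omega
        have hel : (List.take (i+1) g)[i - (k+1)]'hlt = g[i - (k+1)]'hgi := by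
          simp [List.getElem_take]
        have key : List.foldl xor false (List.drop (i-(k+1)) (List.take (i+1) g))
            = xor (g[i - (k+1)]'hgi) (List.foldl xor false (List.drop (i-k) (List.take (i+1) g))) := by
          rw [List.drop_eq_getElem_cons hlt, hstep, List.foldl_cons, foldl_xor_shift, hel]
          simp
        rw [if_neg hik, List.getD_eq_getElem _ _ hgi, key, Bool.xor_comm]

theorem gray2bin_eq_pxor (g : List Bool) :
    (List.foldl (fun p _ => grayStepA p) (g, g) (List.range (g.length - 1))).1 = pxor false g := by
  cases hg : g with
  | nil => rfl
  | cons y ys =>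
    rw [← hg, foldl_range_const]
    have hgne : g ≠ [] := by rw [hg]; exact List.cons_ne_nil _ _
    obtain ⟨_, h1len, _, h1⟩ := stepA_iter g hgne (g.length - 1)
    apply List.ext_getElem (by rw [h1len, pxor_length])
    intro i hi hi'
    have hig : i < g.length := by rwa [h1len] at hi
    rw [← List.getD_eq_getElem _ false, ← List.getD_eq_getElem _ false,
        h1 i hig, pxor_getD g false i hig]
    have : i - (g.length - 1) = 0 := by omega
    rw [this, List.drop_zero]

-- ===== VERDICT (by name: the statement is the Claim_ definition above) =====
theorem gray2bin_spec : Claim_equal_gray2bin := by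
  intro gray_code _
  unfold Spec_gray2bin gray2bin gray2bin_alt
  rw [alt_foldl gray_code false []]
  simp only [List.nil_append]
  rw [gray2bin_eq_pxor]
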